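-- pv_equiv track=rewrite | github.com/CalicheOrozco/calichef | public/clean.py | clean_internal_duplicates
-- ===== SOURCE A (Python) =====
-- def clean_internal_duplicates(data):
--     seen_ids = set()
--     unique_data = []
--     duplicates_removed = 0
--
--     for element in data:
--         element_id = element.get('id')
--         if element_id in seen_ids:
--             duplicates_removed += 1
--         else:
--             seen_ids.add(element_id)
--             unique_data.append(element)
--
--     return unique_data, duplicates_removed
-- ===== SOURCE B (Python) =====
-- def clean_internal_duplicates(data):
--     elements = list(data)
--     ids = [e.get('id') for e in elements]
--     unique_ids = list(dict.fromkeys(ids))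
--     first_by_id = {}
--     for e in reversed(elements):
--         first_by_id[e.get('id')] = e
--     unique_data = [first_by_id[i] for i in unique_ids]
--     return unique_data, len(ids) - len(unique_ids)
-- ===== Notes on version B (the rewrite author's own statement) =====
-- stated objective: alternative
-- what changed: Replaces A's single forward pass with a seen-set and per-element branch by a staged pipeline: extract the id list, ordered-dedup it with dict.fromkeys, build a first-element-per-id map by overwriting inserts over the REVERSED list, assemble the result by mapping lookups over the deduped ids, and derive the removal count from the two lengths.
import Mathlib
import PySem

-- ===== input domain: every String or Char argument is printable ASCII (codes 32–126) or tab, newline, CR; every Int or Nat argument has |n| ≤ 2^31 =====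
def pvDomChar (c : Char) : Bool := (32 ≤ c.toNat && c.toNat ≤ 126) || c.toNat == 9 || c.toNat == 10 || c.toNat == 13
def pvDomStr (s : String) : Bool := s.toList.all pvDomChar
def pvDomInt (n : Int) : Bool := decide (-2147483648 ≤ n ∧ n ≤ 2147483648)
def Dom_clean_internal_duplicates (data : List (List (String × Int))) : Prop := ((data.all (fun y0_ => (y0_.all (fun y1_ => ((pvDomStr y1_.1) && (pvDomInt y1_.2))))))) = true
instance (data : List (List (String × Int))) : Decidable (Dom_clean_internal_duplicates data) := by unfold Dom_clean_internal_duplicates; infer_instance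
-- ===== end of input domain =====

-- B replaces A's forward pass with a seen-set and branch by a staged pipeline (dedup the ids,
-- build a first-element-per-id map over the reversed list, map lookups, count from lengths);
-- objective: alternative (same cost, different algorithm).

-- ===== PORT A =====
-- for element in data: element_id = element.get('id'); branch on seen-set membership
def clean_internal_duplicates (data : List (List (String × Int))) : (List (List (String × Int))) × Int :=
  let st := data.foldl
    (fun (st : PySem.Set (Option Int) × List (List (String × Int)) × Int) element =>
      let element_id := (PySem.Dict.mk element).get? "id"
      if PySem.Set.contains st.1 element_id then
        (st.1, st.2.1, st.2.2 + 1)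
      else
        (PySem.Set.add st.1 element_id, st.2.1 ++ [element], st.2.2))
    (PySem.Set.empty, [], 0)
  (st.2.1, st.2.2)

-- ===== PORT B =====
-- staged: ids, ordered dedup, reverse-overwrite map, map lookups, count from lengths
def clean_internal_duplicates_alt (data : List (List (String × Int))) : (List (List (String × Int))) × Int :=
  let ids := data.map (fun e => (PySem.Dict.mk e).get? "id")
  let unique_ids := PySem.List.dedup ids
  let first_by_id := data.reverse.foldl
    (fun (d : PySem.Dict (Option Int) (List (String × Int))) e =>
      d.insert ((PySem.Dict.mk e).get? "id") e)
    PySem.Dict.empty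
  -- first_by_id[i] never raises here (every i ∈ unique_ids is a key); getD is exact
  let unique_data := unique_ids.map (fun i => first_by_id.getD i [])
  (unique_data, (ids.length : Int) - unique_ids.length)

-- ===== PRECONDITION & SPEC =====
def Spec_clean_internal_duplicates (data : List (List (String × Int))) (out : (List (List (String × Int))) × Int) : Prop := out = clean_internal_duplicates_alt data
instance (data : List (List (String × Int))) (out : (List (List (String × Int))) × Int) : Decidable (Spec_clean_internal_duplicates data out) := by unfold Spec_clean_internal_duplicates; infer_instance

-- ===== CLAIM (what is proved, stated in full; the proofs are below) =====
def Claim_equal_clean_internal_duplicates : Prop := ∀ (data : List (List (String × Int))), Dom_clean_internal_duplicates data → Spec_clean_internal_duplicates data (clean_internal_duplicates data)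

-- ===== LEMMAS AND PROOFS =====

-- the id of an element
def pvKey (e : List (String × Int)) : Option Int := (PySem.Dict.mk e).get? "id"

-- the first element of data carrying id x (B reads it off first_by_id; [] never reached on keys)
def pvFirstWith (data : List (List (String × Int))) (x : Option Int) : List (String × Int) :=
  (data.find? (fun e => pvKey e == x)).getD []

-- B's reverse-overwrite fold computes pvFirstWith (foldr form; reverse.foldl = foldr)
theorem pv_revfold_getD (l : List (List (String × Int)))
    (d0 : PySem.Dict (Option Int) (List (String × Int))) (x : Option Int) :
    ((l.foldr (fun e d => d.insert (pvKey e) e) d0).getD x []) =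
      match l.find? (fun e => pvKey e == x) with
      | some e => e
      | none => d0.getD x [] := by
  induction l with
  | nil => simp
  | cons e t ih =>
    simp only [List.foldr_cons, List.find?_cons]
    rw [PySem.Dict.getD_insert]
    by_cases h : x = pvKey e
    · simp [h]
    · have hb : (pvKey e == x) = false := by
        simpa [beq_iff_eq] using fun hh => h hh.symm
      simp [hb, h, ih]

-- filtering commutes with Set.add / Set.update (sets are first-occurrence lists)
theorem pv_filter_add {α : Type} [BEq α] [LawfulBEq α] (s : PySem.Set α) (x : α) (p : α → Bool) :
    (PySem.Set.add s x).filter p =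
      if p x then PySem.Set.add (s.filter p) x else s.filter p := by
  by_cases hm : x ∈ s <;> by_cases hp : p x <;>
    simp [PySem.Set.add, PySem.Set.contains, hm, hp, List.mem_filter, List.filter_append]

theorem pv_filter_update {α : Type} [BEq α] [LawfulBEq α] (l : List α) (s : PySem.Set α)
    (p : α → Bool) :
    (PySem.Set.update s l).filter p = PySem.Set.update (s.filter p) (l.filter p) := by
  induction l generalizing s with
  | nil => simp [PySem.Set.update]
  | cons x t ih =>
    show (PySem.Set.update (PySem.Set.add s x) t).filter p = _
    rw [ih]
    by_cases hp : p x
    · simp only [List.filter_cons, hp, if_pos trivial]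
      show _ = PySem.Set.update (PySem.Set.add (s.filter p) x) (t.filter p)
      rw [pv_filter_add, if_pos hp]
    · simp only [List.filter_cons, hp]
      rw [pv_filter_add, if_neg (by simp [hp])]
      simp

-- update over a list that avoids a distinguished head element a ∈ front
theorem pv_update_cons_of_not_mem {α : Type} [BEq α] [LawfulBEq α] (l : List α) (s : PySem.Set α)
    (a : α) (h : ∀ y ∈ l, y ≠ a) :
    PySem.Set.update (a :: s) l = a :: PySem.Set.update s l := by
  induction l generalizing s with
  | nil => simp [PySem.Set.update]
  | cons x t ih =>
    have hxa : x ≠ a := h x (by simp)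
    have hadd : PySem.Set.add (a :: s) x = a :: PySem.Set.add s x := by
      by_cases hc : x ∈ s <;> simp [PySem.Set.add, PySem.Set.contains, hxa, hc]
    show PySem.Set.update (PySem.Set.add (a :: s) x) t = _
    rw [hadd]
    exact ih _ (fun y hy => h y (by simp [hy]))

-- adds of elements already present are no-ops
theorem pv_update_filter_self {α : Type} [BEq α] [LawfulBEq α] (l : List α) (s : PySem.Set α)
    (a : α) (ha : a ∈ s) :
    PySem.Set.update s l = PySem.Set.update s (l.filter (fun x => !(x == a))) := by
  induction l generalizing s with
  | nil => simp
  | cons x t ih =>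
    by_cases hx : x = a
    · subst hx
      have hadd : PySem.Set.add s x = s := by
        simp [PySem.Set.add, PySem.Set.contains, ha]
      show PySem.Set.update (PySem.Set.add s x) t = _
      simp only [List.filter_cons, beq_self_eq_true, Bool.not_true, if_neg Bool.false_ne_true]
      rw [hadd]
      exact ih s ha
    · show PySem.Set.update (PySem.Set.add s x) t = _
      have hmem : a ∈ PySem.Set.add s x := by
        by_cases hc : x ∈ s <;> simp [PySem.Set.add, PySem.Set.contains, hc, ha]
      simp only [List.filter_cons, show (!(x == a)) = true by simp [hx], if_pos trivial]
      show _ = PySem.Set.update (PySem.Set.add s x) (t.filter _)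
      exact ih _ hmem

-- ordered dedup, cons form: head kept first, later copies dropped
theorem pv_dedup_cons {α : Type} [BEq α] [LawfulBEq α] (a : α) (l : List α) :
    PySem.List.dedup (a :: l) = a :: (PySem.List.dedup l).filter (fun x => !(x == a)) := by
  have h0 : PySem.Set.add ([] : PySem.Set α) a = [a] := by
    simp [PySem.Set.add, PySem.Set.contains]
  have h1 : PySem.List.dedup (a :: l) = PySem.Set.update [a] l := by
    show PySem.List.dedup (a :: l) = l.foldl PySem.Set.add [a]
    rw [PySem.List.dedup_eq_ofList, PySem.Set.ofList_eq_foldl, List.foldl_cons, h0]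
  have h2 : (PySem.List.dedup l).filter (fun x => !(x == a)) =
      PySem.Set.update [] (l.filter (fun x => !(x == a))) := by
    rw [PySem.List.dedup_eq_ofList, PySem.Set.ofList_eq_foldl]
    exact pv_filter_update l [] (fun x => !(x == a))
  rw [h1, h2, pv_update_filter_self l [a] a (by simp)]
  exact pv_update_cons_of_not_mem _ _ _
    (by intro y hy; simpa using (List.mem_filter.mp hy).2)

-- A's fold, generalized over the accumulator
theorem pv_foldA (l : List (List (String × Int))) (seen : PySem.Set (Option Int))
    (uniq : List (List (String × Int))) (dup : Int) :
    l.foldl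
      (fun (st : PySem.Set (Option Int) × List (List (String × Int)) × Int) element =>
        let element_id := (PySem.Dict.mk element).get? "id"
        if PySem.Set.contains st.1 element_id then
          (st.1, st.2.1, st.2.2 + 1)
        else
          (PySem.Set.add st.1 element_id, st.2.1 ++ [element], st.2.2))
      (seen, uniq, dup) =
    (PySem.Set.update seen (l.map pvKey),
     uniq ++ ((PySem.List.dedup (l.map pvKey)).filter
        (fun x => !PySem.Set.contains seen x)).map (pvFirstWith l),
     dup + ((l.length : Int) -
        ((PySem.List.dedup (l.map pvKey)).filter
          (fun x => !PySem.Set.contains seen x)).length)) := by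
  induction l generalizing seen uniq dup with
  | nil =>
    simp [PySem.Set.update, PySem.List.dedup_eq_ofList, PySem.Set.ofList]
  | cons e t ih =>
    have hkdef : ∀ e' : List (String × Int), (PySem.Dict.mk e').get? "id" = pvKey e' :=
      fun _ => rfl
    have hd : PySem.List.dedup (pvKey e :: t.map pvKey) =
        pvKey e :: (PySem.List.dedup (t.map pvKey)).filter (fun x => !(x == pvKey e)) :=
      pv_dedup_cons _ _
    simp only [List.foldl_cons, List.map_cons, hkdef]
    simp only [hkdef] at ih
    by_cases hc : PySem.Set.contains seen (pvKey e) = true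
    · have hm : pvKey e ∈ seen := by simpa [PySem.Set.contains] using hc
      rw [if_pos hc, ih]
      have hF : (PySem.List.dedup (pvKey e :: t.map pvKey)).filter
            (fun x => !PySem.Set.contains seen x) =
          (PySem.List.dedup (t.map pvKey)).filter (fun x => !PySem.Set.contains seen x) := by
        rw [hd, List.filter_cons, if_neg (by simp; exact hm), List.filter_filter]
        refine List.filter_congr ?_
        intro x _
        by_cases hx : x = pvKey e
        · subst hx; simp [hm]
        · simp [hx]
      have hupd : PySem.Set.update seen (pvKey e :: t.map pvKey) =
          PySem.Set.update seen (t.map pvKey) := by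
        show PySem.Set.update (PySem.Set.add seen (pvKey e)) (t.map pvKey) = _
        rw [show PySem.Set.add seen (pvKey e) = seen from by
          simp [PySem.Set.add, PySem.Set.contains, hm]]
      have hmapfw : ((PySem.List.dedup (t.map pvKey)).filter
            (fun x => !PySem.Set.contains seen x)).map (pvFirstWith (e :: t)) =
          ((PySem.List.dedup (t.map pvKey)).filter
            (fun x => !PySem.Set.contains seen x)).map (pvFirstWith t) := by
        refine List.map_congr_left ?_
        intro x hx
        have hxs : PySem.Set.contains seen x = false := by
          have := (List.mem_filter.mp hx).2; simpa using this
        have hxk : (pvKey e == x) = false := by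
          refine beq_eq_false_iff_ne.mpr ?_
          intro hEq; rw [hEq] at hc; rw [hc] at hxs; exact Bool.noConfusion hxs
        simp [pvFirstWith, hxk]
      rw [hF, hupd, hmapfw]
      refine Prod.ext rfl (Prod.ext rfl ?_)
      simp only [List.length_cons]
      push_cast
      ring
    · have hc' : PySem.Set.contains seen (pvKey e) = false := by
        cases h : PySem.Set.contains seen (pvKey e) <;> simp_all
      have hm' : pvKey e ∉ seen := by simpa [PySem.Set.contains] using hc'
      rw [if_neg hc, ih]
      have hadd : PySem.Set.add seen (pvKey e) = seen ++ [pvKey e] := by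
        simp [PySem.Set.add, PySem.Set.contains, hm']
      have hcontains_add : ∀ x : Option Int,
          PySem.Set.contains (PySem.Set.add seen (pvKey e)) x =
          (PySem.Set.contains seen x || x == pvKey e) := by
        intro x
        rw [hadd]
        by_cases hx : x = pvKey e
        · subst hx; simp [PySem.Set.contains]
        · simp [PySem.Set.contains, hx]
      have hF : (PySem.List.dedup (pvKey e :: t.map pvKey)).filter
            (fun x => !PySem.Set.contains seen x) =
          pvKey e :: (PySem.List.dedup (t.map pvKey)).filter
            (fun x => !PySem.Set.contains (PySem.Set.add seen (pvKey e)) x) := by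
        rw [hd, List.filter_cons, if_pos (by simp; exact hm'), List.filter_filter]
        refine congrArg _ (List.filter_congr ?_)
        intro x _
        rw [hcontains_add x]
        by_cases hx : x = pvKey e
        · subst hx; simp
        · simp [Bool.and_comm]
      have hhead : pvFirstWith (e :: t) (pvKey e) = e := by
        simp [pvFirstWith]
      have hmapfw : ((PySem.List.dedup (t.map pvKey)).filter
            (fun x => !PySem.Set.contains (PySem.Set.add seen (pvKey e)) x)).map
              (pvFirstWith (e :: t)) =
          ((PySem.List.dedup (t.map pvKey)).filter
            (fun x => !PySem.Set.contains (PySem.Set.add seen (pvKey e)) x)).map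
              (pvFirstWith t) := by
        refine List.map_congr_left ?_
        intro x hx
        have hxs := (List.mem_filter.mp hx).2
        rw [hcontains_add x] at hxs
        have hxk : (pvKey e == x) = false := by
          refine beq_eq_false_iff_ne.mpr ?_
          intro hEq
          rw [← hEq] at hxs
          simp at hxs
        simp [pvFirstWith, hxk]
      rw [hF]
      refine Prod.ext rfl (Prod.ext ?_ ?_)
      · show (uniq ++ [e]) ++ _ = uniq ++ _
        rw [List.map_cons, hhead, hmapfw, List.append_assoc, List.singleton_append]
      · show dup + (_ - _) = dup + (_ - _)
        simp only [List.length_cons]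
        push_cast
        ring

-- ===== VERDICT (by name: the statement is the Claim_ definition above) =====
theorem clean_internal_duplicates_spec : Claim_equal_clean_internal_duplicates := by
  intro data _
  unfold Spec_clean_internal_duplicates clean_internal_duplicates clean_internal_duplicates_alt
  have hkdef : ∀ e' : List (String × Int), (PySem.Dict.mk e').get? "id" = pvKey e' :=
    fun _ => rfl
  simp only [hkdef]
  have hA := pv_foldA data PySem.Set.empty [] 0
  simp only [hkdef] at hA
  rw [hA]
  have hempty : (fun x => !PySem.Set.contains PySem.Set.empty x) =
      (fun _ : Option Int => true) := by
    funext x; simp [PySem.Set.contains, PySem.Set.empty]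
  rw [hempty, List.filter_true]
  have hfw : ∀ x : Option Int,
      (List.foldl
        (fun (d : PySem.Dict (Option Int) (List (String × Int))) e => d.insert (pvKey e) e)
        PySem.Dict.empty data.reverse).getD x [] = pvFirstWith data x := by
    intro x
    rw [List.foldl_reverse, pv_revfold_getD]
    unfold pvFirstWith
    cases h : data.find? (fun e => pvKey e == x) <;> simp
  simp only [hfw]
  refine Prod.ext rfl ?_
  simp only [List.length_map]
  ring
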